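/- GENERATED by tools/mkcompositions.py from design/units.gif.tsv (unit `GifMakeMapObject.COMPOSITION`) — do not edit.
   THE PROOF of the composition unit `GifMakeMapObject.COMPOSITION`: the 3 segments of `GifMakeMapObject` chain into its contract, by the theorem
   `Gif.Spec.GifMakeMapObject.compose` (proved next to the cut assertions). -/
import Gif.Spec.Units.GifMakeMapObject_COMPOSITION

/-- The segments of `GifMakeMapObject` compose into its contract. -/
theorem Gif.Spec.Proved.GifMakeMapObject_COMPOSITION_ok : Gif.Spec.GifMakeMapObject_COMPOSITION.Statement := by
  intro Lay _hLay μ _hμ u₀ h_GifMakeMapObject_1 h_GifMakeMapObject_2 h_GifMakeMapObject_E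
  apply Gif.Spec.GifMakeMapObject.compose
  all_goals assumption
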